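-- pv_equiv track=rewrite | github.com/0kchak/attack_2PRESENT24 | attaque.py | find_common_tuples
-- ===== SOURCE A (Python) =====
-- def find_common_tuples(liste1_triee, liste2_triee):
--     # Parcours les deux listes simultanément en maintenant deux indices
--     i, j = 0, 0
--     cle = []
--     while i < len(liste1_triee) and j < len(liste2_triee):
--         if liste1_triee[i][0] < liste2_triee[j][0]:
--             i += 1
--         elif liste1_triee[i][0] > liste2_triee[j][0]:
--             j += 1
--         else:
--             # Les deux éléments sont égaux, donc ajoute toutes les
--             # combinaisons possibles
--             k = i
--             while k < len(liste1_triee) and liste1_triee[k][0] == liste1_triee[i][0]: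
--                 l = j
--                 while l < len(liste2_triee) and liste2_triee[l][0] == liste2_triee[j][0]:
--                     cle.append((liste1_triee[k][1], liste2_triee[l][1]))
--                     l += 1
--                 k += 1
--             i = k
--             j = l
--
--     return cle
-- ===== SOURCE B (Python) =====
-- def _group_runs(lst):
--     # consecutive-equal-key runs: [(key, [values...]), ...]
--     groups = []
--     i = 0
--     n = len(lst)
--     while i < n:
--         k = lst[i][0]
--         vals = []
--         while i < n and lst[i][0] == k:
--             vals.append(lst[i][1])
--             i += 1
--         groups.append((k, vals))
--     return groups
--
-- def find_common_tuples(liste1_triee, liste2_triee):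
--     groups1 = _group_runs(liste1_triee)
--     groups2 = _group_runs(liste2_triee)
--     res = []
--     i, j = 0, 0
--     while i < len(groups1) and j < len(groups2):
--         k1, vs1 = groups1[i]
--         k2, vs2 = groups2[j]
--         if k1 < k2:
--             i += 1
--         elif k1 > k2:
--             j += 1
--         else:
--             res.extend((v1, v2) for v1 in vs1 for v2 in vs2)
--             i += 1
--             j += 1
--     return res
-- ===== Notes on version B (the rewrite author's own statement) =====
-- stated objective: alternative
-- what changed: B first compresses each list into consecutive-equal-key runs (key, [values]) and then does a single two-pointer merge over the two run lists, emitting one cross product per matching pair of runs, instead of A's merge over raw elements with nested rescanning index loops inside the equal branch.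
import Mathlib
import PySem

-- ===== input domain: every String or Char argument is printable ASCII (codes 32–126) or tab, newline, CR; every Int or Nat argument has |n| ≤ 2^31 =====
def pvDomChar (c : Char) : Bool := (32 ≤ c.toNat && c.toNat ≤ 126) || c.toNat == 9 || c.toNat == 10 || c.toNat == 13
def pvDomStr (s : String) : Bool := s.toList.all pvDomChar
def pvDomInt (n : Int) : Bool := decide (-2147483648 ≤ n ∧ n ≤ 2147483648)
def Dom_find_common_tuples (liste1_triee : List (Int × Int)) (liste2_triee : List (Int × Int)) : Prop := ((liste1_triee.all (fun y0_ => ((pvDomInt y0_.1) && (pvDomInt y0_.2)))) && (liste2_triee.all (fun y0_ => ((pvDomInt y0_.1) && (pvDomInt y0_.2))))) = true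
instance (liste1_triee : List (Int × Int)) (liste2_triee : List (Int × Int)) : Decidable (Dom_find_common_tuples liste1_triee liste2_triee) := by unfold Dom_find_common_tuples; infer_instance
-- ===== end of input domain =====

-- B groups each list into consecutive-equal-key runs and merges the two run lists
-- (one cross product per key match) instead of A's merge over raw elements with
-- nested rescanning index loops; alternative decomposition, same asymptotic cost.

-- ===== PORT A =====
-- inner while loop of the equal branch: appends (v1, liste2[l][1]) while
-- l < len(liste2) and liste2[l][0] == liste2[j][0]; returns (final l, appended pairs)
def fctInnerA (l2 : List (Int × Int)) (j : Nat) (v1 : Int) (l : Nat) :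
    Nat × List (Int × Int) :=
  if _h : l < l2.length ∧ (l2.getD l (0, 0)).1 = (l2.getD j (0, 0)).1 then
    let r := fctInnerA l2 j v1 (l + 1)
    (r.1, (v1, (l2.getD l (0, 0)).2) :: r.2)
  else (l, [])
termination_by l2.length - l
decreasing_by omega

def fctOuterA (l1 l2 : List (Int × Int)) (i j k lcur : Nat) :
    Nat × Nat × List (Int × Int) :=
  if _h : k < l1.length ∧ (l1.getD k (0, 0)).1 = (l1.getD i (0, 0)).1 then
    let r := fctInnerA l2 j (l1.getD k (0, 0)).2 j
    let rest := fctOuterA l1 l2 i j (k + 1) r.1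
    (rest.1, rest.2.1, r.2 ++ rest.2.2)
  else (k, lcur, [])
termination_by l1.length - k
decreasing_by omega

def fctMainA (l1 l2 : List (Int × Int)) : Nat → Nat → Nat → List (Int × Int)
  | 0, _, _ => []
  | fuel + 1, i, j =>
    if i < l1.length ∧ j < l2.length then
      if (l1.getD i (0, 0)).1 < (l2.getD j (0, 0)).1 then
        fctMainA l1 l2 fuel (i + 1) j
      else if (l2.getD j (0, 0)).1 < (l1.getD i (0, 0)).1 then
        fctMainA l1 l2 fuel i (j + 1)
      else
        let r := fctOuterA l1 l2 i j i j
        r.2.2 ++ fctMainA l1 l2 fuel r.1 r.2.1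
    else []

-- the fuel argument only makes the while loop structurally recursive: i + j grows
-- by at least 1 per iteration and the loop stops once i or j leaves its list, so
-- l1.length + l2.length iterations always suffice (proved in fctMainA_eq below)
def find_common_tuples (liste1_triee : List (Int × Int)) (liste2_triee : List (Int × Int)) : List (Int × Int) :=
  fctMainA liste1_triee liste2_triee (liste1_triee.length + liste2_triee.length) 0 0

-- ===== PORT B =====
-- Source B's _group_runs: split into consecutive-equal-key runs (key, values)
def groupRuns : List (Int × Int) → List (Int × List Int)
  | [] => []
  | (k, v) :: rest =>
    (k, v :: (rest.takeWhile (fun p => p.1 == k)).map Prod.snd)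
      :: groupRuns (rest.dropWhile (fun p => p.1 == k))
termination_by l => l.length
decreasing_by
  have := List.length_dropWhile_le (fun p => p.1 == k) rest
  simp only [List.length_cons]
  omega

def mergeRuns : List (Int × List Int) → List (Int × List Int) → List (Int × Int)
  | [], _ => []
  | _ :: _, [] => []
  | (k1, vs1) :: g1, (k2, vs2) :: g2 =>
    if k1 < k2 then mergeRuns g1 ((k2, vs2) :: g2)
    else if k2 < k1 then mergeRuns ((k1, vs1) :: g1) g2
    else vs1.flatMap (fun v1 => vs2.map (fun v2 => (v1, v2))) ++ mergeRuns g1 g2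
termination_by g1 g2 => g1.length + g2.length
decreasing_by all_goals (simp only [List.length_cons]; omega)
def find_common_tuples_alt (liste1_triee : List (Int × Int)) (liste2_triee : List (Int × Int)) : List (Int × Int) :=
  mergeRuns (groupRuns liste1_triee) (groupRuns liste2_triee)

-- ===== PRECONDITION & SPEC =====
def Spec_find_common_tuples (liste1_triee : List (Int × Int)) (liste2_triee : List (Int × Int)) (out : List (Int × Int)) : Prop := out = find_common_tuples_alt liste1_triee liste2_triee
instance (liste1_triee : List (Int × Int)) (liste2_triee : List (Int × Int)) (out : List (Int × Int)) : Decidable (Spec_find_common_tuples liste1_triee liste2_triee out) := by unfold Spec_find_common_tuples; infer_instance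

-- ===== CLAIM (what is proved, stated in full; the proofs are below) =====
def Claim_equal_find_common_tuples : Prop := ∀ (liste1_triee : List (Int × Int)) (liste2_triee : List (Int × Int)), Dom_find_common_tuples liste1_triee liste2_triee → Spec_find_common_tuples liste1_triee liste2_triee (find_common_tuples liste1_triee liste2_triee)

-- ===== LEMMAS AND PROOFS =====

-- lower bounds on A's loop indices: the equal branch strictly advances both i and j
theorem fctInnerA_fst_ge (l2 : List (Int × Int)) (j : Nat) (v1 : Int) (l : Nat) :
    l ≤ (fctInnerA l2 j v1 l).1 := by
  rw [fctInnerA]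
  split
  · exact Nat.le_trans (Nat.le_succ l) (fctInnerA_fst_ge l2 j v1 (l + 1))
  · exact Nat.le_refl l
termination_by l2.length - l
decreasing_by omega

theorem fctInnerA_fst_lb (l2 : List (Int × Int)) (j : Nat) (v1 : Int) (l : Nat)
    (hl : l < l2.length) (hk : (l2.getD l (0, 0)).1 = (l2.getD j (0, 0)).1) :
    l + 1 ≤ (fctInnerA l2 j v1 l).1 := by
  rw [fctInnerA, dif_pos ⟨hl, hk⟩]
  exact fctInnerA_fst_ge l2 j v1 (l + 1)

theorem fctOuterA_fst_ge (l1 l2 : List (Int × Int)) (i j k lcur : Nat) :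
    k ≤ (fctOuterA l1 l2 i j k lcur).1 := by
  rw [fctOuterA]
  split
  · exact Nat.le_trans (Nat.le_succ k) (fctOuterA_fst_ge l1 l2 i j (k + 1) _)
  · exact Nat.le_refl k
termination_by l1.length - k
decreasing_by omega

theorem fctOuterA_snd_ge (l1 l2 : List (Int × Int)) (i j k lcur : Nat)
    (hj : j < l2.length) (hl : j + 1 ≤ lcur) :
    j + 1 ≤ (fctOuterA l1 l2 i j k lcur).2.1 := by
  rw [fctOuterA]
  split
  · exact fctOuterA_snd_ge l1 l2 i j (k + 1) _ hj
      (fctInnerA_fst_lb l2 j _ j hj rfl)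
  · exact hl
termination_by l1.length - k
decreasing_by omega

theorem fctInnerA_eq (l2 : List (Int × Int)) (j : Nat) (v1 : Int) (l : Nat) :
    fctInnerA l2 j v1 l =
      (l + ((l2.drop l).takeWhile (fun p => p.1 == (l2.getD j (0, 0)).1)).length,
       ((l2.drop l).takeWhile (fun p => p.1 == (l2.getD j (0, 0)).1)).map
         (fun p => (v1, p.2))) := by
  fun_induction fctInnerA l2 j v1 l with
  | case1 l h r ih =>
    obtain ⟨hl, hk⟩ := h
    have hd : l2.drop l = l2[l] :: l2.drop (l + 1) := List.drop_eq_getElem_cons hl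
    have hg : l2.getD l (0, 0) = l2[l] := List.getD_eq_getElem l2 (0, 0) hl
    show ((fctInnerA l2 j v1 (l + 1)).1, (v1, (l2.getD l (0, 0)).2) :: (fctInnerA l2 j v1 (l + 1)).2) = _
    rw [ih, hd, List.takeWhile_cons, if_pos (by rw [beq_iff_eq, ← hg]; exact hk)]
    rw [Prod.mk.injEq]
    constructor
    · simp only [List.length_cons]; omega
    · simp only [List.map_cons, hg]
  | case2 l h =>
    by_cases hl : l < l2.length
    · have hd : l2.drop l = l2[l] :: l2.drop (l + 1) := List.drop_eq_getElem_cons hl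
      have hg : l2.getD l (0, 0) = l2[l] := List.getD_eq_getElem l2 (0, 0) hl
      have hk : ¬ (l2[l].1 = (l2.getD j (0, 0)).1) := fun hc => h ⟨hl, by rw [hg]; exact hc⟩
      rw [hd, List.takeWhile_cons, if_neg (by rw [beq_iff_eq]; exact hk)]
      simp
    · rw [List.drop_eq_nil_of_le (by omega)]
      simp

theorem fctOuterA_eq (l1 l2 : List (Int × Int)) (i j : Nat) (k lcur : Nat) :
    fctOuterA l1 l2 i j k lcur =
      (k + ((l1.drop k).takeWhile (fun p => p.1 == (l1.getD i (0, 0)).1)).length,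
       (if ((l1.drop k).takeWhile (fun p => p.1 == (l1.getD i (0, 0)).1)).length = 0
        then lcur
        else j + ((l2.drop j).takeWhile (fun q => q.1 == (l2.getD j (0, 0)).1)).length),
       ((l1.drop k).takeWhile (fun p => p.1 == (l1.getD i (0, 0)).1)).flatMap
         (fun p => ((l2.drop j).takeWhile (fun q => q.1 == (l2.getD j (0, 0)).1)).map
           (fun q => (p.2, q.2)))) := by
  fun_induction fctOuterA l1 l2 i j k lcur with
  | case1 k lcur h r rest ih =>
    obtain ⟨hl, hk⟩ := h
    have hd : l1.drop k = l1[k] :: l1.drop (k + 1) := List.drop_eq_getElem_cons hl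
    have hg : l1.getD k (0, 0) = l1[k] := List.getD_eq_getElem l1 (0, 0) hl
    have hr : r = (j + ((l2.drop j).takeWhile (fun q => q.1 == (l2.getD j (0, 0)).1)).length,
        ((l2.drop j).takeWhile (fun q => q.1 == (l2.getD j (0, 0)).1)).map
          (fun q => ((l1.getD k (0, 0)).2, q.2))) :=
      fctInnerA_eq l2 j (l1.getD k (0, 0)).2 j
    have hrest : rest = _ := ih
    have htw : (l1.drop k).takeWhile (fun p => p.1 == (l1.getD i (0, 0)).1)
        = l1[k] :: (l1.drop (k + 1)).takeWhile (fun p => p.1 == (l1.getD i (0, 0)).1) := by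
      rw [hd, List.takeWhile_cons, if_pos (by rw [beq_iff_eq, ← hg]; exact hk)]
    show (rest.1, rest.2.1, r.2 ++ rest.2.2) = _
    rw [hrest, hr, htw]
    rw [Prod.mk.injEq, Prod.mk.injEq]
    refine ⟨by simp only [List.length_cons]; omega, ?_, ?_⟩
    · simp only [List.length_cons, if_neg (Nat.succ_ne_zero _)]
      split <;> rfl
    · simp only [List.flatMap_cons, hg]
  | case2 k lcur h =>
    by_cases hl : k < l1.length
    · have hd : l1.drop k = l1[k] :: l1.drop (k + 1) := List.drop_eq_getElem_cons hl
      have hg : l1.getD k (0, 0) = l1[k] := List.getD_eq_getElem l1 (0, 0) hl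
      have hk : ¬ (l1[k].1 = (l1.getD i (0, 0)).1) := fun hc => h ⟨hl, by rw [hg]; exact hc⟩
      rw [hd, List.takeWhile_cons, if_neg (by rw [beq_iff_eq]; exact hk)]
      simp
    · rw [List.drop_eq_nil_of_le (by omega)]
      simp

theorem drop_length_takeWhile {α : Type} (p : α → Bool) (s : List α) :
    s.drop (s.takeWhile p).length = s.dropWhile p := by
  induction s with
  | nil => rfl
  | cons x t ih =>
    by_cases hp : p x
    · simp [hp, ih]
    · simp [hp]

theorem mergeRuns_skip_left (s : List (Int × Int)) (k1 : Int) (v : Int)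
    (k2 : Int) (vs2 : List Int) (g2 : List (Int × List Int)) (h : k1 < k2) :
    mergeRuns (groupRuns ((k1, v) :: s)) ((k2, vs2) :: g2) =
      mergeRuns (groupRuns s) ((k2, vs2) :: g2) := by
  rw [groupRuns, mergeRuns, if_pos h]
  cases s with
  | nil => rfl
  | cons x t =>
    obtain ⟨k, v'⟩ := x
    by_cases hk : k = k1
    · subst hk
      rw [List.dropWhile_cons]
      simp only [beq_self_eq_true, if_true]
      rw [groupRuns, mergeRuns, if_pos h]
    · rw [List.dropWhile_cons, if_neg (by simp [hk]), groupRuns]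

theorem mergeRuns_skip_right (k1 : Int) (vs1 : List Int) (g1 : List (Int × List Int))
    (s : List (Int × Int)) (k2 : Int) (v : Int) (h : k2 < k1) :
    mergeRuns ((k1, vs1) :: g1) (groupRuns ((k2, v) :: s)) =
      mergeRuns ((k1, vs1) :: g1) (groupRuns s) := by
  rw [groupRuns, mergeRuns, if_neg (by omega), if_pos h]
  cases s with
  | nil => rfl
  | cons x t =>
    obtain ⟨k, v'⟩ := x
    by_cases hk : k = k2
    · subst hk
      rw [List.dropWhile_cons]
      simp only [beq_self_eq_true, if_true]
      rw [groupRuns, mergeRuns, if_neg (by omega), if_pos h]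
    · rw [List.dropWhile_cons, if_neg (by simp [hk]), groupRuns]

theorem cross_eq (u v : List (Int × Int)) :
    u.flatMap (fun p => v.map (fun q => (p.2, q.2))) =
      (u.map Prod.snd).flatMap (fun a => (v.map Prod.snd).map (fun b => (a, b))) := by
  simp only [List.flatMap_map, List.map_map]
  rfl

theorem fctMainA_eq (l1 l2 : List (Int × Int)) (fuel i j : Nat)
    (hfuel : (l1.length - i) + (l2.length - j) ≤ fuel) :
    fctMainA l1 l2 fuel i j =
      mergeRuns (groupRuns (l1.drop i)) (groupRuns (l2.drop j)) := by
  induction fuel generalizing i j with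
  | zero =>
    rw [List.drop_eq_nil_of_le (show l1.length ≤ i by omega)]
    simp [fctMainA, groupRuns, mergeRuns]
  | succ fuel ih =>
    by_cases h : i < l1.length ∧ j < l2.length
    · obtain ⟨hi, hj⟩ := h
      have hd1 : l1.drop i = l1[i] :: l1.drop (i + 1) := List.drop_eq_getElem_cons hi
      have hd2 : l2.drop j = l2[j] :: l2.drop (j + 1) := List.drop_eq_getElem_cons hj
      have hg1 : l1.getD i (0, 0) = l1[i] := List.getD_eq_getElem l1 (0, 0) hi
      have hg2 : l2.getD j (0, 0) = l2[j] := List.getD_eq_getElem l2 (0, 0) hj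
      rw [fctMainA, if_pos ⟨hi, hj⟩]
      by_cases hlt : (l1.getD i (0, 0)).1 < (l2.getD j (0, 0)).1
      · rw [if_pos hlt, ih (i + 1) j (by omega), hd1, hd2]
        rcases hx : l1[i] with ⟨k1, v1⟩
        rcases hy : l2[j] with ⟨k2, w⟩
        rw [hg1, hx, hg2, hy] at hlt
        rw [groupRuns]
        exact (mergeRuns_skip_left (l1.drop (i + 1)) k1 v1 k2 _ _ hlt).symm
      · rw [if_neg hlt]
        by_cases hgt : (l2.getD j (0, 0)).1 < (l1.getD i (0, 0)).1
        · rw [if_pos hgt, ih i (j + 1) (by omega), hd1, hd2]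
          rcases hx : l1[i] with ⟨k1, v1⟩
          rcases hy : l2[j] with ⟨k2, w⟩
          rw [hg1, hx, hg2, hy] at hgt
          rw [groupRuns]
          exact (mergeRuns_skip_right k1 _ _ (l2.drop (j + 1)) k2 w hgt).symm
        · rw [if_neg hgt]
          have hb1 : (l1[i].1 == (l1.getD i (0, 0)).1) = true := by rw [beq_iff_eq, hg1]
          have hb2 : (l2[j].1 == (l2.getD j (0, 0)).1) = true := by rw [beq_iff_eq, hg2]
          have htw1 : (l1.drop i).takeWhile (fun p => p.1 == (l1.getD i (0, 0)).1)
              = l1[i] :: (l1.drop (i + 1)).takeWhile (fun p => p.1 == (l1.getD i (0, 0)).1) := by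
            rw [hd1, List.takeWhile_cons, if_pos hb1]
          have htw2 : (l2.drop j).takeWhile (fun q => q.1 == (l2.getD j (0, 0)).1)
              = l2[j] :: (l2.drop (j + 1)).takeWhile (fun q => q.1 == (l2.getD j (0, 0)).1) := by
            rw [hd2, List.takeWhile_cons, if_pos hb2]
          have hlen1 : ((l1.drop i).takeWhile (fun p => p.1 == (l1.getD i (0, 0)).1)).length ≠ 0 := by
            rw [htw1]; simp
          have hdrop1 :
              l1.drop (i + ((l1.drop i).takeWhile (fun p => p.1 == (l1.getD i (0, 0)).1)).length)
              = (l1.drop (i + 1)).dropWhile (fun p => p.1 == (l1.getD i (0, 0)).1) := by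
            rw [← List.drop_drop, drop_length_takeWhile, hd1, List.dropWhile_cons, if_pos hb1]
          have hdrop2 :
              l2.drop (j + ((l2.drop j).takeWhile (fun q => q.1 == (l2.getD j (0, 0)).1)).length)
              = (l2.drop (j + 1)).dropWhile (fun q => q.1 == (l2.getD j (0, 0)).1) := by
            rw [← List.drop_drop, drop_length_takeWhile, hd2, List.dropWhile_cons, if_pos hb2]
          have h1 : i + 1 ≤ (fctOuterA l1 l2 i j i j).1 := by
            rw [fctOuterA, dif_pos ⟨hi, rfl⟩]
            exact fctOuterA_fst_ge l1 l2 i j (i + 1) _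
          have h2 : j + 1 ≤ (fctOuterA l1 l2 i j i j).2.1 := by
            rw [fctOuterA, dif_pos ⟨hi, rfl⟩]
            exact fctOuterA_snd_ge l1 l2 i j (i + 1) _ hj
              (fctInnerA_fst_lb l2 j _ j hj rfl)
          have hr : fctOuterA l1 l2 i j i j = _ := fctOuterA_eq l1 l2 i j i j
          show (fctOuterA l1 l2 i j i j).2.2 ++
              fctMainA l1 l2 fuel (fctOuterA l1 l2 i j i j).1 (fctOuterA l1 l2 i j i j).2.1 = _
          rw [ih (fctOuterA l1 l2 i j i j).1 (fctOuterA l1 l2 i j i j).2.1 (by omega), hr]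
          simp only [if_neg hlen1]
          rw [hdrop1, hdrop2, htw1, htw2]
          rw [hd1, hd2]
          rcases hx : l1[i] with ⟨k1, v1⟩
          rcases hy : l2[j] with ⟨k2, w⟩
          rw [hg1, hx] at hlt
          rw [hg2, hy] at hlt
          rw [hg1, hx, hg2, hy] at hgt
          simp only [hg1, hg2, hx, hy]
          rw [groupRuns]
          rw [groupRuns]
          rw [mergeRuns]
          rw [if_neg (by exact hlt), if_neg (by exact hgt)]
          congr 1
          · rw [cross_eq ((k1, v1) :: (l1.drop (i + 1)).takeWhile (fun p => p.1 == k1))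
              ((k2, w) :: (l2.drop (j + 1)).takeWhile (fun q => q.1 == k2))]
            simp only [List.map_cons]
    · rw [fctMainA, if_neg h]
      rcases Nat.lt_or_ge i l1.length with hi | hi
      · have hj : l2.length ≤ j := by omega
        rw [List.drop_eq_nil_of_le hj]
        cases groupRuns (l1.drop i) <;> simp [mergeRuns, groupRuns]
      · rw [List.drop_eq_nil_of_le hi]
        simp [mergeRuns, groupRuns]

-- ===== VERDICT (by name: the statement is the Claim_ definition above) =====
theorem find_common_tuples_spec : Claim_equal_find_common_tuples := by
  intro l1 l2 _
  show find_common_tuples l1 l2 = find_common_tuples_alt l1 l2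
  unfold find_common_tuples find_common_tuples_alt
  simpa using fctMainA_eq l1 l2 (l1.length + l2.length) 0 0 (by omega)
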